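-- pv_equiv track=rewrite | github.com/minus9d/programming_contest_archive | event/ttpc2015/f/f.fail.py | solve
-- ===== SOURCE A (Python) =====
-- def solve(a):
--     if a < 10:
--         return 0
--     if a % 10 == 0:
--         return 1 + solve(a // 10)
--
--     s = str(a)
--     s = list(map(int,s[::-1]))
--
--     t = 0
--     ans = 0
--     for i in range(len(s)):
--         if s[i] == 0 and t == 0:
--             ans += 1
--         else:
--             if s[i] == 9:
--                 if t != 0:
--                     ans += 1
--                     t = 1
--             if i != len(s)-1 and s[i+1] == 9:
--                 if s[i] + t + 9 >= 10:
--                     t = 1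
--                 else:
--                     t = 0
--     return ans
-- ===== SOURCE B (Python) =====
-- def solve(a):
--     if a < 10:
--         return 0
--     count = 0
--     while a % 10 == 0:
--         count += 1
--         a //= 10
--     if a < 10:
--         return count
--     digits = [int(c) for c in str(a)][::-1]
--     ans = count
--     carry = False
--     prev = 0
--     for d in digits:
--         if not carry and d == 9 and prev != 0:
--             carry = True
--         if carry:
--             if d == 9:
--                 ans += 1
--         else:
--             if d == 0:
--                 ans += 1
--         prev = d
--     return ans
-- ===== Notes on version B (the rewrite author's own statement) =====
-- stated objective: alternative
-- what changed: Trailing zeros are stripped by an iterative while-loop instead of recursion, and the digit scan is rewritten as a single look-behind pass keeping (carry flag, previous digit) instead of A's lookahead scan with a numeric carry variable updated from s[i+1].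
import Mathlib
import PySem

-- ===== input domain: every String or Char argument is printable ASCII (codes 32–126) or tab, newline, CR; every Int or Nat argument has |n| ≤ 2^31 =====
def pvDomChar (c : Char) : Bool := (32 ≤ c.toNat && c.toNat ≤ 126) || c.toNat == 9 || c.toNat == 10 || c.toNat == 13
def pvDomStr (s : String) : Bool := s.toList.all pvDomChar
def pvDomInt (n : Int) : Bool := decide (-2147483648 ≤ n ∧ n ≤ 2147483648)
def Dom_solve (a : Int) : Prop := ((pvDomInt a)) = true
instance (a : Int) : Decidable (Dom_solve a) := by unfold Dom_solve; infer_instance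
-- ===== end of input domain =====

-- B strips trailing zeros with an iterative loop and replaces the lookahead
-- numeric-carry digit scan by a single look-behind pass with a boolean flag
-- (objective: alternative; same cost).

-- ===== PORT A =====

-- int(c) for a decimal digit character (exact for the digit chars str(a) produces)
def pyDigit (c : Char) : Int := (c.toNat : Int) - 48

-- the 'for i in range(len(s))' loop of A as structural recursion on the same
-- state (t, ans); the lookahead s[i+1] becomes the second pattern element
def solveScan : List Int → Int → Int → Int
  | [], _, ans => ans
  | [x], t, ans =>
      if x = 0 ∧ t = 0 then ans + 1
      else if x = 9 ∧ t ≠ 0 then ans + 1 else ans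
  | x :: y :: r, t, ans =>
      if x = 0 ∧ t = 0 then solveScan (y :: r) t (ans + 1)
      else
        let ans' := if x = 9 ∧ t ≠ 0 then ans + 1 else ans
        let t1 := if x = 9 ∧ t ≠ 0 then 1 else t
        let t' := if y = 9 then (if x + t1 + 9 ≥ 10 then 1 else 0) else t1
        solveScan (y :: r) t' ans'

def solve (a : Int) : Int :=
  if _h : a < 10 then 0
  else if _h2 : PySem.Int.mod a 10 = 0 then 1 + solve (PySem.Int.floordiv a 10)
  else
    -- s = list(map(int, str(a)[::-1]))
    let s := ((PySem.Str.slice? (PySem.Int.toStr a) none none (-1)).getD "").toList.map pyDigit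
    solveScan s 0 0
termination_by a.toNat
decreasing_by
  have hb : (0 : Int) < 10 := by norm_num
  have h1 : (1 : Int) ≤ PySem.Int.floordiv a 10 :=
    (PySem.Int.le_floordiv_iff_mul_le hb).mpr (by omega)
  have h2 : PySem.Int.floordiv a 10 < a :=
    (PySem.Int.floordiv_lt_iff_lt_mul hb).mpr (by nlinarith)
  omega

-- ===== PORT B =====

-- while a % 10 == 0: count += 1; a //= 10   (the '1 ≤ a' conjunct only makes
-- the recursion total; it holds whenever the Python loop runs)
def stripZeros (a : Int) (count : Int) : Int × Int :=
  if h : PySem.Int.mod a 10 = 0 ∧ 1 ≤ a then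
    stripZeros (PySem.Int.floordiv a 10) (count + 1)
  else (a, count)
termination_by a.toNat
decreasing_by
  have hb : (0 : Int) < 10 := by norm_num
  have hdvd : (10 : Int) ∣ a := (PySem.Int.mod_eq_zero_iff_dvd a 10).mp h.1
  have h10 : (10 : Int) ≤ a := Int.le_of_dvd (by omega) hdvd
  have h1 : (1 : Int) ≤ PySem.Int.floordiv a 10 :=
    (PySem.Int.le_floordiv_iff_mul_le hb).mpr (by omega)
  have h2 : PySem.Int.floordiv a 10 < a :=
    (PySem.Int.floordiv_lt_iff_lt_mul hb).mpr (by nlinarith)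
  omega

-- digits of a, least significant first:  [int(c) for c in str(a)][::-1]
def digitsB (a : Int) : List Int := ((PySem.Int.toStr a).toList.map pyDigit).reverse

-- the 'for d in digits' loop of B: state (carry, prev, ans)
def scanLoop : List Int → Bool → Int → Int → Int
  | [], _, _, ans => ans
  | d :: r, carry, prev, ans =>
      let c := carry || (decide (d = 9) && decide (prev ≠ 0))
      let ans' := if c then (if d = 9 then ans + 1 else ans)
                  else (if d = 0 then ans + 1 else ans)
      scanLoop r c d ans'

def solve_alt (a : Int) : Int :=
  if a < 10 then 0
  else
    let p := stripZeros a 0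
    if p.1 < 10 then p.2 else scanLoop (digitsB p.1) false 0 p.2

-- ===== PRECONDITION & SPEC =====
def Spec_solve (a : Int) (out : Int) : Prop := out = solve_alt a
instance (a : Int) (out : Int) : Decidable (Spec_solve a out) := by unfold Spec_solve; infer_instance

-- ===== CLAIM (what is proved, stated in full; the proofs are below) =====
def Claim_equal_solve : Prop := ∀ (a : Int), Dom_solve a → Spec_solve a (solve a)

-- ===== LEMMAS AND PROOFS =====

-- index of the first digit that flips the flag (or the length), as seen with a
-- given previous digit; both scans are proved equal to the same closed form
def firstTrig (prev : Int) : List Int → Nat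
  | [] => 0
  | x :: r => if x = 9 ∧ prev ≠ 0 then 0 else firstTrig x r + 1

def closedF (prev : Int) (s : List Int) : Int :=
  ((s.take (firstTrig prev s)).count 0 : Int) + ((s.drop (firstTrig prev s)).count 9 : Int)

theorem digitChar_48 (m : Nat) (hm : m < 10) : 48 ≤ (Nat.digitChar m).toNat := by
  interval_cases m <;> decide

theorem toDigitsCore_48 (f : Nat) : ∀ (n : Nat) (ds : List Char),
    (∀ c ∈ ds, 48 ≤ c.toNat) → ∀ c ∈ Nat.toDigitsCore 10 f n ds, 48 ≤ c.toNat := by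
  induction f with
  | zero => intro n ds hds c hc; exact hds c hc
  | succ f ih =>
      intro n ds hds c hc
      have hd : ∀ c' ∈ Nat.digitChar (n % 10) :: ds, 48 ≤ c'.toNat := by
        intro c' hc'
        rcases List.mem_cons.mp hc' with h | h
        · subst h; exact digitChar_48 _ (Nat.mod_lt _ (by norm_num))
        · exact hds c' h
      simp only [Nat.toDigitsCore] at hc
      split at hc
      · exact hd c hc
      · exact ih _ _ hd c hc

theorem toStr_digits_48 (a : Int) (ha : 0 ≤ a) :
    ∀ c ∈ (PySem.Int.toStr a).toList, 48 ≤ c.toNat := by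
  intro c hc
  rw [PySem.Int.toList_toStr] at hc
  unfold PySem.Int.toChars at hc
  rw [if_neg (by omega)] at hc
  exact toDigitsCore_48 _ _ _ (by simp) c hc

theorem digitsB_nonneg (a : Int) (ha : 0 ≤ a) : ∀ x ∈ digitsB a, 0 ≤ x := by
  intro x hx
  unfold digitsB at hx
  rw [List.mem_reverse, List.mem_map] at hx
  obtain ⟨c, hc, rfl⟩ := hx
  have := toStr_digits_48 a ha c hc
  unfold pyDigit; omega

-- A's scan with the flag already set counts the nines
theorem scan_one (s : List Int) : ∀ ans : Int, (∀ x ∈ s, 0 ≤ x) →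
    solveScan s 1 ans = ans + (s.count 9 : Int) := by
  induction s with
  | nil => intro ans _; simp [solveScan]
  | cons x tl ih =>
      intro ans hpos
      cases tl with
      | nil =>
          by_cases hx9 : x = 9 <;>
            simp [solveScan, hx9]
      | cons y r =>
          have hx : 0 ≤ x := hpos x (by simp)
          have hpos' : ∀ z ∈ y :: r, 0 ≤ z := fun z hz => hpos z (by simp [hz])
          have hstep : solveScan (x :: y :: r) 1 ans
              = solveScan (y :: r) 1 (if x = 9 then ans + 1 else ans) := by
            by_cases hx9 : x = 9 <;> by_cases hy9 : y = 9 <;>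
              simp [solveScan, hx9, hy9, show (10:Int) ≤ x + 1 + 9 from by omega]
          rw [hstep, ih _ hpos']
          by_cases hx9 : x = 9 <;> by_cases hy9 : y = 9 <;>
            simp [hx9, hy9, List.count_cons] <;> omega

-- A's scan with the flag clear equals the closed form (prev = 0: no digit saw
-- a less-significant neighbour yet)
theorem scan_zero (s : List Int) : ∀ ans : Int, (∀ x ∈ s, 0 ≤ x) →
    solveScan s 0 ans = ans + closedF 0 s := by
  induction s with
  | nil => intro ans _; simp [solveScan, closedF, firstTrig]
  | cons x tl ih =>
      intro ans hpos
      have hk : firstTrig 0 (x :: tl) = firstTrig x tl + 1 := by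
        simp [firstTrig]
      cases tl with
      | nil =>
          by_cases hx : x = 0 <;>
            simp [solveScan, closedF, firstTrig, hx]
      | cons y r =>
          have hx : 0 ≤ x := hpos x (by simp)
          have hpos' : ∀ z ∈ y :: r, 0 ≤ z := fun z hz => hpos z (by simp [hz])
          by_cases hy9 : y = 9
          · by_cases hx0 : x = 0
            · have hb : solveScan (x :: y :: r) 0 ans = solveScan (y :: r) 0 (ans + 1) := by
                simp [solveScan, hx0]
              rw [hb, ih _ hpos']
              unfold closedF
              rw [hk]
              have hk2 : firstTrig x (y :: r) = firstTrig y r + 1 := by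
                simp [firstTrig, hy9, hx0]
              have hk3 : firstTrig 0 (y :: r) = firstTrig y r + 1 := by
                simp [firstTrig]
              rw [hk2, hk3]
              simp [List.count_cons, hx0]
              ring
            · -- trigger: the flag becomes (and stays) set
              have hk2 : firstTrig x (y :: r) = 0 := by simp [firstTrig, hy9, hx0]
              have hb : solveScan (x :: y :: r) 0 ans = solveScan (y :: r) 1 ans := by
                simp [solveScan, hx0, hy9, show (10:Int) ≤ x + 9 from by omega]
              rw [hb, scan_one _ _ hpos']
              unfold closedF
              rw [hk, hk2]
              simp [List.count_cons, hx0]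
          · have hk2 : firstTrig x (y :: r) = firstTrig y r + 1 := by
              simp [firstTrig, hy9]
            have hk3 : firstTrig 0 (y :: r) = firstTrig y r + 1 := by
              simp [firstTrig]
            by_cases hx0 : x = 0
            · have hb : solveScan (x :: y :: r) 0 ans = solveScan (y :: r) 0 (ans + 1) := by
                simp [solveScan, hx0]
              rw [hb, ih _ hpos']
              unfold closedF
              rw [hk, hk2, hk3]
              simp [List.take_succ_cons, List.drop_succ_cons, List.count_cons, hx0]
              push_cast
              ring
            · have hb : solveScan (x :: y :: r) 0 ans = solveScan (y :: r) 0 ans := by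
                simp [solveScan, hx0, hy9]
              rw [hb, ih _ hpos']
              unfold closedF
              rw [hk, hk2, hk3]
              simp [List.take_succ_cons, List.drop_succ_cons, List.count_cons, hx0]

-- B's scan with the flag set counts the nines
theorem scanLoop_true (s : List Int) : ∀ (prev ans : Int),
    scanLoop s true prev ans = ans + (s.count 9 : Int) := by
  induction s with
  | nil => intro prev ans; simp [scanLoop]
  | cons d r ih =>
      intro prev ans
      by_cases hd : d = 9 <;>
        simp [scanLoop, hd, ih, List.count_cons] <;> ring

-- B's scan with the flag clear equals the closed form with the carried prev
theorem scanLoop_false (s : List Int) : ∀ (prev ans : Int),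
    scanLoop s false prev ans = ans + closedF prev s := by
  induction s with
  | nil => intro prev ans; simp [scanLoop, closedF, firstTrig]
  | cons d r ih =>
      intro prev ans
      by_cases ht : d = 9 ∧ prev ≠ 0
      · have hk : firstTrig prev (d :: r) = 0 := by simp [firstTrig, ht]
        have hb : scanLoop (d :: r) false prev ans = scanLoop r true d (ans + 1) := by
          simp [scanLoop, ht.1, ht.2]
        rw [hb, scanLoop_true]
        unfold closedF
        rw [hk]
        simp [List.count_cons, ht.1]
        ring
      · have hk : firstTrig prev (d :: r) = firstTrig d r + 1 := by
          simp [firstTrig, ht]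
        have hb : scanLoop (d :: r) false prev ans
            = scanLoop r false d (if d = 0 then ans + 1 else ans) := by
          by_cases hd9 : d = 9
          · have hp : prev = 0 := by tauto
            simp [scanLoop, hd9, hp]
          · by_cases hp : prev = 0 <;> simp [scanLoop, hd9, hp]
        rw [hb, ih]
        unfold closedF
        rw [hk]
        by_cases hd0 : d = 0 <;>
          simp [List.take_succ_cons, List.drop_succ_cons, List.count_cons, hd0] <;>
          push_cast <;> ring

theorem strip_shift (n : Nat) : ∀ (a : Int), a.toNat ≤ n → ∀ c : Int,
    stripZeros a c = ((stripZeros a 0).1, (stripZeros a 0).2 + c) := by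
  induction n with
  | zero =>
      intro a hn c
      have hg : ¬ (PySem.Int.mod a 10 = 0 ∧ 1 ≤ a) := by
        rintro ⟨_, h1⟩; omega
      rw [stripZeros, dif_neg hg, stripZeros, dif_neg hg]
      simp
  | succ n ih =>
      intro a hn c
      by_cases hg : PySem.Int.mod a 10 = 0 ∧ 1 ≤ a
      · have hdvd : (10 : Int) ∣ a := (PySem.Int.mod_eq_zero_iff_dvd a 10).mp hg.1
        have h10 : (10 : Int) ≤ a := Int.le_of_dvd (by omega) hdvd
        have hb : (0 : Int) < 10 := by norm_num
        have h1 : (1 : Int) ≤ PySem.Int.floordiv a 10 :=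
          (PySem.Int.le_floordiv_iff_mul_le hb).mpr (by omega)
        have h2 : PySem.Int.floordiv a 10 < a :=
          (PySem.Int.floordiv_lt_iff_lt_mul hb).mpr (by nlinarith)
        have hn' : (PySem.Int.floordiv a 10).toNat ≤ n := by omega
        have e1 : ∀ d : Int, stripZeros a d = stripZeros (PySem.Int.floordiv a 10) (d + 1) :=
          fun d => by rw [stripZeros, dif_pos hg]
        rw [e1 c, e1 0, ih _ hn' (c + 1), ih _ hn' (0 + 1)]
        simp
        ring
      · rw [stripZeros, dif_neg hg, stripZeros, dif_neg hg]
        simp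

theorem strip_fix (a : Int) (hm : PySem.Int.mod a 10 ≠ 0) : stripZeros a 0 = (a, 0) := by
  rw [stripZeros, dif_neg (by tauto)]

-- shifting the accumulator out of B's scan
theorem scanLoop_shift (s : List Int) : ∀ (c : Bool) (prev ans : Int),
    scanLoop s c prev ans = ans + scanLoop s c prev 0 := by
  cases s with
  | nil => intro c prev ans; simp [scanLoop]
  | cons d r =>
      intro c prev ans
      cases c
      · rw [scanLoop_false, scanLoop_false]; ring
      · rw [scanLoop_true, scanLoop_true]; ring

theorem alt_step (a : Int) (h10 : 10 ≤ a) (hm : PySem.Int.mod a 10 = 0) :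
    solve_alt a = 1 + solve_alt (PySem.Int.floordiv a 10) := by
  have hb : (0 : Int) < 10 := by norm_num
  have hq1 : (1 : Int) ≤ PySem.Int.floordiv a 10 :=
    (PySem.Int.le_floordiv_iff_mul_le hb).mpr (by omega)
  have hstrip : stripZeros a 0 = ((stripZeros (PySem.Int.floordiv a 10) 0).1,
      (stripZeros (PySem.Int.floordiv a 10) 0).2 + 1) := by
    rw [stripZeros, dif_pos ⟨hm, by omega⟩,
      strip_shift (PySem.Int.floordiv a 10).toNat _ le_rfl (0 + 1)]
    simp
  by_cases hq : PySem.Int.floordiv a 10 < 10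
  · have hqm : PySem.Int.mod (PySem.Int.floordiv a 10) 10 ≠ 0 := by
      intro hc
      have := Int.le_of_dvd (show (0:Int) < PySem.Int.floordiv a 10 by omega)
        ((PySem.Int.mod_eq_zero_iff_dvd _ 10).mp hc)
      omega
    have hfix := strip_fix _ hqm
    have hR : solve_alt (PySem.Int.floordiv a 10) = 0 := by
      simp only [solve_alt]
      rw [if_pos hq]
    rw [hR]
    simp only [solve_alt]
    rw [if_neg (show ¬ a < 10 by omega), hstrip, hfix]
    split_ifs with hc
    · norm_num
    · exact absurd hq hc
  · simp only [solve_alt]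
    rw [if_neg (by omega), if_neg hq, hstrip]
    split_ifs with hlt
    · ring
    · rw [scanLoop_shift _ _ _ ((stripZeros (PySem.Int.floordiv a 10) 0).2 + 1),
          scanLoop_shift _ _ _ ((stripZeros (PySem.Int.floordiv a 10) 0).2)]
      ring

theorem solve_eq_alt (a : Int) : solve a = solve_alt a := by
  induction a using solve.induct with
  | case1 a h =>
      rw [solve, dif_pos h]
      simp only [solve_alt]
      rw [if_pos h]
  | case2 a h hm ih =>
      rw [solve, dif_neg h, dif_pos hm, ih, alt_step a (by omega) hm]
  | case3 a h hm =>
      rw [solve, dif_neg h, dif_neg hm]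
      have ha0 : (0 : Int) ≤ a := by omega
      have hsl : ((PySem.Str.slice? (PySem.Int.toStr a) none none (-1)).getD "").toList.map pyDigit
          = digitsB a := by
        rw [PySem.Str.slice?_none_none_neg_one]
        unfold digitsB
        simp [List.map_reverse]
      simp only [hsl]
      rw [scan_zero _ _ (digitsB_nonneg a ha0)]
      simp only [solve_alt]
      rw [if_neg h, strip_fix a hm]
      rw [scanLoop_false]
      simp [h]

-- ===== VERDICT (by name: the statement is the Claim_ definition above) =====
theorem solve_spec : Claim_equal_solve := by
  intro a _
  unfold Spec_solve
  exact solve_eq_alt a
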